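-- pv_equiv track=rewrite | github.com/msft-mirror-aosp/platform.external.toolchain-utils | llvm_tools/patch_utils.py | predict_indent
-- ===== SOURCE A (Python) =====
-- from typing import (
--     Any,
--     Callable,
--     Dict,
--     IO,
--     Iterable,
--     List,
--     Optional,
--     Tuple,
--     Union,
-- )
--
-- def predict_indent(patches_lines: List[str]) -> int:
--     """Given file lines, predict and return the max indentation unit."""
--     indents = [len(x) - len(x.lstrip(" ")) for x in patches_lines]
--     if all(x % 4 == 0 for x in indents):
--         return 4
--     if all(x % 2 == 0 for x in indents):
--         return 2
--     if all(x == 0 for x in indents):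
--         return 0
--     return 1
-- ===== SOURCE B (Python) =====
-- def _gcd(a, b):
--     while b:
--         a, b = b, a % b
--     return a
--
--
-- def _leading_spaces(s):
--     n = 0
--     while n < len(s) and s[n] == " ":
--         n += 1
--     return n
--
--
-- def predict_indent(patches_lines):
--     """Given file lines, predict and return the max indentation unit."""
--     g = 0
--     for line in patches_lines:
--         g = _gcd(g, _leading_spaces(line))
--     if g % 4 == 0:
--         return 4
--     if g % 2 == 0:
--         return 2
--     return 1
-- ===== Notes on version B (the rewrite author's own statement) =====
-- stated objective: alternative
-- what changed: Replaces A's three full passes over the indent list (all %4, all %2, all ==0; the ==0 branch is dead code) by a single fold that maintains the running gcd of the leading-space counts and then classifies that one number by divisibility.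
import Mathlib
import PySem

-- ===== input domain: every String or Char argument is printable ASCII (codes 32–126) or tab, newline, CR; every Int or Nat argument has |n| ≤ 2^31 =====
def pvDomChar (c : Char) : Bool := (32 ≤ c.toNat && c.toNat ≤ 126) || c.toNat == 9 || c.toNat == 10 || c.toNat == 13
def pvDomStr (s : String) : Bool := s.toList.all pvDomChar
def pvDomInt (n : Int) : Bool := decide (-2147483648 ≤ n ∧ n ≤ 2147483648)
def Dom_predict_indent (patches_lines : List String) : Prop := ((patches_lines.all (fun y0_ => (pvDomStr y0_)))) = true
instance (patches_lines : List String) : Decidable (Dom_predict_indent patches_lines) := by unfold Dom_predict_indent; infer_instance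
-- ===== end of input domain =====

-- B replaces A's three full passes over the indent list by one gcd fold; objective: alternative (one pass, same cost class).

-- ===== PORT A =====
-- x.lstrip(" ") strips exactly the leading ' ' characters: ported as dropWhile (· == ' ') on the code points (exact).
def predict_indent (patches_lines : List String) : Int :=
  let indents := patches_lines.map
    (fun x => (x.toList.length : Int) - ((x.toList.dropWhile (fun c => c == ' ')).length : Int))
  if indents.all (fun x => PySem.Int.mod x 4 == 0) then 4
  else if indents.all (fun x => PySem.Int.mod x 2 == 0) then 2
  else if indents.all (fun x => x == 0) then 0
  else 1

-- ===== PORT B =====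
-- Source B's hand-written Euclid loop (values are nonnegative, so Python's % is Nat.%)
def pvEuclid (a b : Nat) : Nat :=
  if b = 0 then a else pvEuclid b (a % b)
decreasing_by exact Nat.mod_lt _ (Nat.pos_of_ne_zero (by assumption))

-- Source B's leading-space counting loop
def pvLeading : List Char → Nat
  | [] => 0
  | c :: rest => if c == ' ' then 1 + pvLeading rest else 0

def predict_indent_alt (patches_lines : List String) : Int :=
  let g := patches_lines.foldl (fun g line => pvEuclid g (pvLeading line.toList)) 0
  if g % 4 = 0 then 4
  else if g % 2 = 0 then 2
  else 1

-- ===== PRECONDITION & SPEC =====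
def Spec_predict_indent (patches_lines : List String) (out : Int) : Prop := out = predict_indent_alt patches_lines
instance (patches_lines : List String) (out : Int) : Decidable (Spec_predict_indent patches_lines out) := by unfold Spec_predict_indent; infer_instance

-- ===== CLAIM (what is proved, stated in full; the proofs are below) =====
def Claim_equal_predict_indent : Prop := ∀ (patches_lines : List String), Dom_predict_indent patches_lines → Spec_predict_indent patches_lines (predict_indent patches_lines)

-- ===== LEMMAS AND PROOFS =====

theorem pvEuclid_eq_gcd (a b : Nat) : pvEuclid a b = Nat.gcd b a := by
  induction b using Nat.strong_induction_on generalizing a with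
  | _ b ih =>
    rw [pvEuclid]
    by_cases hb : b = 0
    · simp [hb]
    · rw [if_neg hb, ih (a % b) (Nat.mod_lt _ (Nat.pos_of_ne_zero hb)) b]
      exact (Nat.gcd_rec b a).symm

theorem dvd_pvEuclid (k a b : Nat) : k ∣ pvEuclid a b ↔ k ∣ a ∧ k ∣ b := by
  rw [pvEuclid_eq_gcd, Nat.dvd_gcd_iff]
  exact and_comm

theorem pvLeading_eq (cs : List Char) :
    pvLeading cs = cs.length - (cs.dropWhile (fun c => c == ' ')).length := by
  induction cs with
  | nil => rfl
  | cons c rest ih =>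
    rw [List.dropWhile_cons]
    by_cases h : (c == ' ') = true
    · have hle := List.length_dropWhile_le (fun c => c == ' ') rest
      rw [if_pos h]
      simp only [pvLeading, h, if_true, ih, List.length_cons]
      omega
    · rw [if_neg h]
      simp [pvLeading, h]

-- A's per-line indent (an Int) is the cast of B's per-line indent (a Nat).
theorem indent_cast (x : String) :
    (x.toList.length : Int) - ((x.toList.dropWhile (fun c => c == ' ')).length : Int)
      = (pvLeading x.toList : Int) := by
  have := List.length_dropWhile_le (fun c => c == ' ') x.toList
  rw [pvLeading_eq]
  omega

-- k divides the gcd fold iff it divides the seed and every element.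
theorem dvd_foldl_euclid (k : Nat) (l : List Nat) (g : Nat) :
    k ∣ l.foldl (fun g x => pvEuclid g x) g ↔ k ∣ g ∧ ∀ x ∈ l, k ∣ x := by
  induction l generalizing g with
  | nil => simp
  | cons a t ih =>
    rw [List.foldl_cons, ih, dvd_pvEuclid]
    constructor
    · rintro ⟨⟨hg, ha⟩, ht⟩
      exact ⟨hg, fun x hx => (List.mem_cons.mp hx).elim (fun h => h ▸ ha) (ht x)⟩
    · rintro ⟨hg, ht⟩
      exact ⟨⟨hg, ht a (by simp)⟩, fun x hx => ht x (List.mem_cons_of_mem _ hx)⟩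

-- Python's ↑n % 4 == 0 / ↑n % 2 == 0 on a cast Nat is divisibility.
theorem pymod4 (n : Nat) : (PySem.Int.mod (n : Int) 4 == 0) = true ↔ 4 ∣ n := by
  rw [beq_iff_eq, PySem.Int.mod_eq_zero_iff_dvd]
  constructor <;> intro h <;> exact_mod_cast h

theorem pymod2 (n : Nat) : (PySem.Int.mod (n : Int) 2 == 0) = true ↔ 2 ∣ n := by
  rw [beq_iff_eq, PySem.Int.mod_eq_zero_iff_dvd]
  constructor <;> intro h <;> exact_mod_cast h

-- ===== VERDICT (by name: the statement is the Claim_ definition above) =====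
theorem predict_indent_spec : Claim_equal_predict_indent := by
  intro ls _
  unfold Spec_predict_indent predict_indent predict_indent_alt
  simp only [indent_cast, List.all_map, Function.comp_def]
  have hconv : ls.foldl (fun g line => pvEuclid g (pvLeading line.toList)) 0
      = (ls.map (fun x => pvLeading x.toList)).foldl (fun g x => pvEuclid g x) 0 :=
    List.foldl_map.symm
  rw [hconv]
  set g := (ls.map (fun x => pvLeading x.toList)).foldl (fun g x => pvEuclid g x) 0 with hgdef
  have hfold : ∀ k : Nat, k ∣ g ↔ ∀ x ∈ ls, k ∣ pvLeading x.toList := by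
    intro k
    rw [hgdef, dvd_foldl_euclid]
    simp
  have h4 : (ls.all (fun x => PySem.Int.mod ((pvLeading x.toList : Int)) 4 == 0)) = true ↔ 4 ∣ g := by
    rw [List.all_eq_true, hfold 4]
    exact ⟨fun h x hx => (pymod4 _).mp (h x hx), fun h x hx => (pymod4 _).mpr (h x hx)⟩
  have h2 : (ls.all (fun x => PySem.Int.mod ((pvLeading x.toList : Int)) 2 == 0)) = true ↔ 2 ∣ g := by
    rw [List.all_eq_true, hfold 2]
    exact ⟨fun h x hx => (pymod2 _).mp (h x hx), fun h x hx => (pymod2 _).mpr (h x hx)⟩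
  have h0 : (ls.all (fun x => ((pvLeading x.toList : Int) == 0))) = true → 2 ∣ g := by
    intro h
    refine (hfold 2).mpr (fun x hx => ?_)
    have hz := List.all_eq_true.mp h x hx
    rw [beq_iff_eq] at hz
    have : pvLeading x.toList = 0 := by exact_mod_cast hz
    simp [this]
  have hm4 : g % 4 = 0 ↔ 4 ∣ g := Nat.dvd_iff_mod_eq_zero.symm
  have hm2 : g % 2 = 0 ↔ 2 ∣ g := Nat.dvd_iff_mod_eq_zero.symm
  by_cases c4 : 4 ∣ g
  · rw [if_pos (h4.mpr c4), if_pos (hm4.mpr c4)]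
  · rw [if_neg (fun h => c4 (h4.mp h)), if_neg (fun h => c4 (hm4.mp h))]
    by_cases c2 : 2 ∣ g
    · rw [if_pos (h2.mpr c2), if_pos (hm2.mpr c2)]
    · rw [if_neg (fun h => c2 (h2.mp h)), if_neg (fun h => c2 (hm2.mp h)),
          if_neg (fun h => c2 (h0 h))]
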